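-- pv_equiv track=rewrite | github.com/autobotbotbot11/naic-medtech | backend/apps/results/rendering.py | disambiguate_duplicate_group_titles
-- ===== SOURCE A (Python) =====
-- from collections import Counter, defaultdict
--
-- def disambiguate_duplicate_group_titles(groups):
--     title_counts = Counter(group.get("title", "") for group in groups if group.get("title"))
--     title_indexes = defaultdict(int)
--     disambiguated = []
--     for group in groups:
--         title = group.get("title", "")
--         if title and title_counts[title] > 1:
--             title_indexes[title] += 1
--             group = {**group, "title": f"{title} ({title_indexes[title]})"}
--         disambiguated.append(group)
--     return disambiguated
-- ===== SOURCE B (Python) =====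
-- from collections import defaultdict
--
-- def disambiguate_duplicate_group_titles(groups):
--     indexes_by_title = defaultdict(list)
--     for i, group in enumerate(groups):
--         title = group.get("title", "")
--         if title:
--             indexes_by_title[title].append(i)
--     result = list(groups)
--     for title, idxs in indexes_by_title.items():
--         if len(idxs) > 1:
--             for n, i in enumerate(idxs, 1):
--                 result[i] = {**groups[i], "title": f"{title} ({n})"}
--     return result
-- ===== Notes on version B (the rewrite author's own statement) =====
-- stated objective: alternative
-- what changed: A numbers duplicates in one stateful left-to-right pass over groups, carrying a Counter of all titles plus a running per-title occurrence dict; B never walks groups with counters: it groups indices by title into a title->index-list map, copies the input list, and for each title whose index list has more than one entry scatters the numbered replacements back into the copy by position.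
import Mathlib
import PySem

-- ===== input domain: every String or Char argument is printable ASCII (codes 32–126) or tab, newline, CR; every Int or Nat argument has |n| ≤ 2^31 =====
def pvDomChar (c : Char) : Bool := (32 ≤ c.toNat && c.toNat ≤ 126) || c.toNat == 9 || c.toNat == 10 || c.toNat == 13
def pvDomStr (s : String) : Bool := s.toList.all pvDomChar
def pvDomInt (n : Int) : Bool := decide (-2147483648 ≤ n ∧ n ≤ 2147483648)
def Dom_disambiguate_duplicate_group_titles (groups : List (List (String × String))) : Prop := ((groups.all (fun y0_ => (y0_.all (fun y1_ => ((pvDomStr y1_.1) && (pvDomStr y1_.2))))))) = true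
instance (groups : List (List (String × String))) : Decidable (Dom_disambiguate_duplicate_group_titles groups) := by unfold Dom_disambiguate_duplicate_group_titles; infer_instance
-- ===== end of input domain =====

-- B replaces A's single stateful pass (Counter + running per-title index dict) by a
-- group-then-scatter plan: a title -> index-list map built once, then numbered
-- replacements written back by position (objective: alternative; same cost).
-- Shared primitive helpers: dict access and the f-string, used identically by both ports.
def titleOf (g : List (String × String)) : String :=
  (PySem.Dict.ofList g).getD "title" ""

def setTitle (g : List (String × String)) (v : String) : List (String × String) :=
  ((PySem.Dict.ofList g).insert "title" v).items

def fmtTitle (t : String) (n : Int) : String :=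
  PySem.Str.join "" [t, " (", PySem.Int.toStr n, ")"]

-- ===== PORT A =====
-- the body of A's for-loop (state: (title_indexes, disambiguated))
def aStep (title_counts : PySem.Dict String Int)
    (st : PySem.Dict String Int × List (List (String × String)))
    (group : List (String × String)) :
    PySem.Dict String Int × List (List (String × String)) :=
  let title := titleOf group
  if title ≠ "" ∧ title_counts.getD title 0 > 1 then
    let idxs := st.1.modify title 0 (· + 1)
    (idxs, st.2 ++ [setTitle group (fmtTitle title (idxs.getD title 0))])
  else
    (st.1, st.2 ++ [group])

def disambiguate_duplicate_group_titles (groups : List (List (String × String))) : List (List (String × String)) :=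
  let title_counts : PySem.Dict String Int :=
    PySem.Dict.counter ((groups.filter (fun g => titleOf g ≠ "")).map titleOf)
  (groups.foldl (aStep title_counts) (PySem.Dict.empty, [])).2

-- ===== PORT B =====
-- the body of B's first loop: indexes_by_title[title].append(i) for truthy titles
def bIndexStep (d : PySem.Dict String (List Int))
    (p : Int × List (String × String)) : PySem.Dict String (List Int) :=
  let title := titleOf p.2
  if title ≠ "" then d.modify title [] (· ++ [p.1]) else d

-- the body of B's second loop, one (title, idxs) item of the map; the inner loop writes
-- result[i] (indices produced by enumerate are always in range, so the total pySetD/pyGetD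
-- forms are exact here)
def bScatter (groups : List (List (String × String)))
    (res : List (List (String × String))) (item : String × List Int) :
    List (List (String × String)) :=
  if item.2.length > 1 then
    (PySem.List.enumerate item.2 1).foldl
      (fun r q =>
        PySem.List.pySetD r q.2 (setTitle (PySem.List.pyGetD groups q.2 []) (fmtTitle item.1 q.1)))
      res
  else
    res

def disambiguate_duplicate_group_titles_alt (groups : List (List (String × String))) : List (List (String × String)) :=
  let indexes_by_title : PySem.Dict String (List Int) :=
    (PySem.List.enumerate groups 0).foldl bIndexStep PySem.Dict.empty
  indexes_by_title.items.foldl (bScatter groups) groups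

-- ===== PRECONDITION & SPEC =====
def Spec_disambiguate_duplicate_group_titles (groups : List (List (String × String))) (out : List (List (String × String))) : Prop := out = disambiguate_duplicate_group_titles_alt groups
instance (groups : List (List (String × String))) (out : List (List (String × String))) : Decidable (Spec_disambiguate_duplicate_group_titles groups out) := by unfold Spec_disambiguate_duplicate_group_titles; infer_instance

-- ===== CLAIM (what is proved, stated in full; the proofs are below) =====
def Claim_equal_disambiguate_duplicate_group_titles : Prop := ∀ (groups : List (List (String × String))), Dom_disambiguate_duplicate_group_titles groups → Spec_disambiguate_duplicate_group_titles groups (disambiguate_duplicate_group_titles groups)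

-- ===== LEMMAS AND PROOFS =====

-- the common pointwise description both ports are reduced to: element (j, g) of enumerate
-- becomes setTitle g "<t> (<count of t among titles[0..j]>)" iff its title is truthy and duplicated
def renderAt (tls : List String) (p : Int × List (String × String)) : List (String × String) :=
  if titleOf p.2 ≠ "" ∧ tls.count (titleOf p.2) > 1 then
    setTitle p.2 (fmtTitle (titleOf p.2) (((tls.take (p.1.toNat + 1)).count (titleOf p.2) : Int)))
  else
    p.2

-- A's Counter holds, for each truthy title, its total count among all titles.
lemma counter_titles_getD (groups : List (List (String × String))) (t : String) (ht : t ≠ "") :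
    (PySem.Dict.counter ((groups.filter (fun g => titleOf g ≠ "")).map titleOf)).getD t 0
      = ((groups.map titleOf).count t : Int) := by
  rw [PySem.Dict.getD_counter]
  have hmf : (groups.filter (fun g => titleOf g ≠ "")).map titleOf
      = (groups.map titleOf).filter (fun s => s ≠ "") := by
    rw [List.filter_map]; rfl
  rw [hmf, List.count_filter]
  simp [ht]

-- A-side loop invariant: folding A's loop over `rest` appends exactly the renderAt values.
lemma a_loop_eq (tls : List String) (tc : PySem.Dict String Int)
    (htc : ∀ t, t ≠ "" → tc.getD t 0 = (tls.count t : Int)) :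
    ∀ (rest pre : List (List (String × String))),
      tls = (pre ++ rest).map titleOf →
      ∀ (d : PySem.Dict String Int) (acc : List (List (String × String))),
        (∀ t, t ≠ "" → tls.count t > 1 → d.getD t 0 = ((pre.map titleOf).count t : Int)) →
        (rest.foldl (aStep tc) (d, acc)).2
          = acc ++ (PySem.List.enumerate rest (pre.length : Int)).map (renderAt tls) := by
  intro rest
  induction rest with
  | nil =>
    intro pre _ d acc _
    simp [PySem.List.enumerate]
  | cons g rest ih =>
    intro pre htls d acc hinv
    set title := titleOf g with htitle
    have htake : tls.take (((pre.length : Int)).toNat + 1) = pre.map titleOf ++ [title] := by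
      rw [htls]
      simp [List.take_append]
      exact htitle.symm
    rw [List.foldl_cons, PySem.List.enumerate_cons]
    by_cases hc : title ≠ "" ∧ tc.getD title 0 > 1
    · obtain ⟨ht0, hgt⟩ := hc
      have hcount : tc.getD title 0 = (tls.count title : Int) := htc title ht0
      have hcnt1 : tls.count title > 1 := by rw [hcount] at hgt; exact_mod_cast hgt
      have hpre : d.getD title 0 = ((pre.map titleOf).count title : Int) := hinv title ht0 hcnt1
      have hstep : aStep tc (d, acc) g
          = (d.modify title 0 (· + 1),
             acc ++ [setTitle g (fmtTitle title (((pre.map titleOf).count title : Int) + 1))]) := by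
        simp only [aStep, ← htitle, if_pos (show title ≠ "" ∧ tc.getD title 0 > 1 from ⟨ht0, hgt⟩)]
        rw [PySem.Dict.getD_modify_self, hpre]
      rw [hstep]
      rw [ih (pre ++ [g]) (by simpa using htls) _ _ ?_]
      · have hrender : renderAt tls ((pre.length : Int), g)
            = setTitle g (fmtTitle title (((pre.map titleOf).count title : Int) + 1)) := by
          simp only [renderAt, ← htitle, if_pos (show title ≠ "" ∧ tls.count title > 1 from ⟨ht0, hcnt1⟩),
            htake]
          simp [List.count_append]
        simp [hrender, List.append_assoc]
      · intro t' ht' hcnt'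
        rw [PySem.Dict.getD_modify]
        by_cases he : t' = title
        · subst he
          rw [if_pos rfl, hpre]
          have : (List.count title [titleOf g]) = 1 := by simp [← htitle]
          simp [List.count_append, this]
        · rw [if_neg he, hinv t' ht' hcnt']
          have hne' : ¬ titleOf g = t' := fun h => he (h.symm.trans htitle.symm)
          simp [List.count_append, hne']
    · have hstep : aStep tc (d, acc) g = (d, acc ++ [g]) := by
        simp only [aStep, ← htitle, if_neg hc]
      rw [hstep]
      have hcfalse : ¬ (title ≠ "" ∧ tls.count title > 1) := by
        intro ⟨ht0, hgt⟩
        exact hc ⟨ht0, by rw [htc title ht0]; exact_mod_cast hgt⟩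
      rw [ih (pre ++ [g]) (by simpa using htls) _ _ ?_]
      · have hrender : renderAt tls ((pre.length : Int), g) = g := by
          simp only [renderAt, ← htitle, if_neg hcfalse]
        simp [hrender, List.append_assoc]
      · intro t' ht' hcnt'
        rw [hinv t' ht' hcnt']
        have hne' : ¬ titleOf g = t' := by
          intro h
          exact hcfalse ⟨by rw [← htitle] at h; rw [h]; exact ht', by rw [← htitle] at h; rw [h]; exact hcnt'⟩
        simp [List.count_append, hne']


-- ---------- B-side machinery ----------

-- the ascending list of (Int) positions of t in tls, offset by s (proof-side description
-- of B's index lists)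
def occIdx (t : String) : List String → Int → List Int
  | [], _ => []
  | x :: rest, s => if x = t then s :: occIdx t rest (s + 1) else occIdx t rest (s + 1)

lemma occIdx_length (t : String) : ∀ (tls : List String) (s : Int),
    (occIdx t tls s).length = tls.count t := by
  intro tls
  induction tls with
  | nil => intro s; simp [occIdx]
  | cons x rest ih =>
    intro s
    by_cases hx : x = t
    · simp [occIdx, hx, ih]
    · simp [occIdx, hx, ih]

lemma occIdx_mem (t : String) : ∀ (tls : List String) (s : Int) (i : Int),
    i ∈ occIdx t tls s → ∃ k : Nat, k < tls.length ∧ i = s + k ∧ tls[k]? = some t := by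
  intro tls
  induction tls with
  | nil => intro s i h; simp [occIdx] at h
  | cons x rest ih =>
    intro s i h
    by_cases hx : x = t
    · simp only [occIdx, if_pos hx, List.mem_cons] at h
      rcases h with h | h
      · exact ⟨0, by simp, by omega, by simp [hx]⟩
      · obtain ⟨k, hk, hi, ht⟩ := ih (s + 1) i h
        exact ⟨k + 1, by simpa using hk, by omega, by simpa using ht⟩
    · simp only [occIdx, if_neg hx] at h
      obtain ⟨k, hk, hi, ht⟩ := ih (s + 1) i h
      exact ⟨k + 1, by simpa using hk, by omega, by simpa using ht⟩

lemma occIdx_ge (t : String) : ∀ (tls : List String) (s : Int) (i : Int),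
    i ∈ occIdx t tls s → s ≤ i := by
  intro tls s i h
  obtain ⟨k, _, hi, _⟩ := occIdx_mem t tls s i h
  omega

lemma occIdx_pairwise (t : String) : ∀ (tls : List String) (s : Int),
    (occIdx t tls s).Pairwise (· < ·) := by
  intro tls
  induction tls with
  | nil => intro s; simp [occIdx]
  | cons x rest ih =>
    intro s
    by_cases hx : x = t
    · simp only [occIdx, if_pos hx]
      exact List.Pairwise.cons (fun i hi => by have := occIdx_ge t rest (s + 1) i hi; omega) (ih (s + 1))
    · simp only [occIdx, if_neg hx]; exact ih (s + 1)

-- the (occurrence-number, position) pair of position j lies in the enumerated index list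
lemma occIdx_enum_mem (t : String) : ∀ (tls : List String) (s c : Int) (j : Nat)
    (hj : j < tls.length), tls[j] = t →
    (c + ((tls.take j).count t : Int), s + (j : Int)) ∈ PySem.List.enumerate (occIdx t tls s) c := by
  intro tls
  induction tls with
  | nil => intro s c j hj; simp at hj
  | cons x rest ih =>
    intro s c j hj ht
    cases j with
    | zero =>
      simp only [List.getElem_cons_zero] at ht
      simp [occIdx, ht, PySem.List.enumerate_cons]
    | succ k =>
      simp only [List.getElem_cons_succ] at ht
      have hk : k < rest.length := by simpa using hj
      by_cases hx : x = t
      · have h := ih (s + 1) (c + 1) k hk ht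
        simp only [occIdx, if_pos hx, PySem.List.enumerate_cons, List.mem_cons]
        right
        have h1 : c + (((x :: rest).take (k + 1)).count t : Int)
            = (c + 1) + ((rest.take k).count t : Int) := by
          simp [hx]; omega
        have h2 : s + ((k + 1 : Nat) : Int) = (s + 1) + (k : Int) := by push_cast; ring
        rw [h1, h2]; exact h
      · have h := ih (s + 1) c k hk ht
        simp only [occIdx, if_neg hx]
        have h1 : c + (((x :: rest).take (k + 1)).count t : Int)
            = c + ((rest.take k).count t : Int) := by
          simp [hx]
        have h2 : s + ((k + 1 : Nat) : Int) = (s + 1) + (k : Int) := by push_cast; ring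
        rw [h1, h2]; exact h


-- ---------- scatter writes, read back pointwise ----------

lemma scatter_length {α : Type} (v : Int × Int → α) :
    ∀ (ps : List (Int × Int)) (r : List α),
      (ps.foldl (fun r q => PySem.List.pySetD r q.2 (v q)) r).length = r.length := by
  intro ps
  induction ps with
  | nil => intro r; rfl
  | cons p ps ih =>
    intro r
    rw [List.foldl_cons, ih, PySem.List.length_pySetD]

lemma scatter_untouched {α : Type} (v : Int × Int → α) :
    ∀ (ps : List (Int × Int)) (r : List α) (j : Nat),
      (∀ q ∈ ps, 0 ≤ q.2) → (∀ q ∈ ps, q.2 ≠ (j : Int)) →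
      (ps.foldl (fun r q => PySem.List.pySetD r q.2 (v q)) r)[j]? = r[j]? := by
  intro ps
  induction ps with
  | nil => intro r j _ _; rfl
  | cons p ps ih =>
    intro r j hpos hne
    rw [List.foldl_cons, ih _ j (fun q hq => hpos q (List.mem_cons_of_mem _ hq))
      (fun q hq => hne q (List.mem_cons_of_mem _ hq))]
    rw [PySem.List.pySetD_of_nonneg _ _ (hpos p (List.mem_cons_self))]
    have h1 := hpos p List.mem_cons_self
    have h2 := hne p List.mem_cons_self
    rw [List.getElem?_set_ne (by omega)]

lemma scatter_hit {α : Type} (v : Int × Int → α) :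
    ∀ (ps : List (Int × Int)) (r : List α) (j : Nat) (q : Int × Int),
      (∀ q' ∈ ps, 0 ≤ q'.2) → ps.Pairwise (fun a b => a.2 ≠ b.2) →
      q ∈ ps → q.2 = (j : Int) → j < r.length →
      (ps.foldl (fun r q => PySem.List.pySetD r q.2 (v q)) r)[j]? = some (v q) := by
  intro ps
  induction ps with
  | nil => intro r j q _ _ hq; simp at hq
  | cons p ps ih =>
    intro r j q hpos hpw hq hqj hj
    rw [List.foldl_cons]
    rcases List.mem_cons.mp hq with rfl | hq'
    · rw [scatter_untouched v ps _ j (fun q' h => hpos q' (List.mem_cons_of_mem _ h))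
        (fun q' h => by
          have := (List.pairwise_cons.mp hpw).1 q' h
          omega)]
      rw [PySem.List.pySetD_of_nonneg _ _ (hpos q List.mem_cons_self), hqj]
      simp [hj]
    · exact ih _ j q (fun q' h => hpos q' (List.mem_cons_of_mem _ h))
        (List.pairwise_cons.mp hpw).2 hq' hqj
        (by rw [PySem.List.length_pySetD]; exact hj)

-- ---------- B's index dict, characterised ----------

lemma dict_getD_aux (t : String) (ht : t ≠ "") :
    ∀ (gs : List (List (String × String))) (s : Int) (d : PySem.Dict String (List Int)),
      ((PySem.List.enumerate gs s).foldl bIndexStep d).getD t []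
        = d.getD t [] ++ occIdx t (gs.map titleOf) s := by
  intro gs
  induction gs with
  | nil => intro s d; simp [PySem.List.enumerate_nil, occIdx]
  | cons g gs ih =>
    intro s d
    rw [PySem.List.enumerate_cons, List.foldl_cons]
    by_cases hg : titleOf g = ""
    · have hstep : bIndexStep d (s, g) = d := by simp [bIndexStep, hg]
      rw [hstep, ih]
      simp only [List.map_cons, occIdx]
      rw [if_neg (fun h : titleOf g = t => ht (by rw [← h]; exact hg))]
    · have hstep : bIndexStep d (s, g) = d.modify (titleOf g) [] (· ++ [s]) := by
        simp [bIndexStep, hg]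
      rw [hstep, ih]
      by_cases he : titleOf g = t
      · rw [he, PySem.Dict.getD_modify_self]
        simp [occIdx, he, List.append_assoc]
      · rw [PySem.Dict.getD_modify_of_ne _ _ _ (fun h => he h.symm)]
        simp [occIdx, he]

lemma dict_keys_aux :
    ∀ (gs : List (List (String × String))) (s : Int) (d : PySem.Dict String (List Int)),
      ((PySem.List.enumerate gs s).foldl bIndexStep d).keys
        = PySem.Set.update d.keys ((gs.map titleOf).filter (fun t => t ≠ "")) := by
  intro gs
  induction gs with
  | nil => intro s d; simp [PySem.List.enumerate_nil, PySem.Set.update]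
  | cons g gs ih =>
    intro s d
    rw [PySem.List.enumerate_cons, List.foldl_cons]
    by_cases hg : titleOf g = ""
    · have hstep : bIndexStep d (s, g) = d := by simp [bIndexStep, hg]
      rw [hstep, ih]
      simp [hg, PySem.Set.update]
    · have hstep : bIndexStep d (s, g) = d.modify (titleOf g) [] (· ++ [s]) := by
        simp [bIndexStep, hg]
      rw [hstep, ih]
      have hkeys : (d.modify (titleOf g) [] (· ++ [s])).keys
          = PySem.Set.add d.keys (titleOf g) := by
        rw [PySem.Dict.keys_modify]
        by_cases hc : d.contains (titleOf g) = true
        · have hm : titleOf g ∈ d.keys := (PySem.Dict.contains_iff_mem_keys _ _).mp hc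
          rw [PySem.Dict.keys_insert_of_contains _ _ hc]
          simp [PySem.Set.add, PySem.Set.contains, hm]
        · have hm : titleOf g ∉ d.keys :=
            fun h => hc ((PySem.Dict.contains_iff_mem_keys _ _).mpr h)
          rw [PySem.Dict.keys_insert_of_not_contains _ _ (by simpa using hc)]
          simp [PySem.Set.add, PySem.Set.contains, hm]
      rw [hkeys]
      simp [PySem.Set.update, hg]

-- ---------- the pointwise form after processing a set P of titles ----------

def mapform (groups : List (List (String × String))) (P : List String) :
    List (List (String × String)) :=
  (PySem.List.enumerate groups 0).map
    (fun p => if titleOf p.2 ∈ P then renderAt (groups.map titleOf) p else p.2)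

lemma mapform_length (groups : List (List (String × String))) (P : List String) :
    (mapform groups P).length = groups.length := by
  simp [mapform, PySem.List.length_enumerate]

lemma scatter_one (groups : List (List (String × String))) (t : String) (ht : t ≠ "")
    (P : List String) :
    bScatter groups (mapform groups P) (t, occIdx t (groups.map titleOf) 0)
      = mapform groups (P ++ [t]) := by
  set tls := groups.map titleOf with htls
  by_cases hlen : (occIdx t tls 0).length > 1
  · -- duplicated title: the scatter writes renderAt at exactly the positions of t
    have hcnt : tls.count t > 1 := by rw [← occIdx_length t tls 0]; exact hlen
    rw [bScatter, if_pos hlen]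
    set v : Int × Int → List (String × String) :=
      fun q => setTitle (PySem.List.pyGetD groups q.2 []) (fmtTitle t q.1) with hv
    have hpos : ∀ q' ∈ PySem.List.enumerate (occIdx t tls 0) 1, 0 ≤ q'.2 := by
      intro q' hq'
      have : q'.2 ∈ occIdx t tls 0 := by
        have := (PySem.List.mem_enumerate_iff _ _ _).mp hq'
        obtain ⟨k, hk, rfl⟩ := this
        exact List.getElem_mem hk
      exact occIdx_ge t tls 0 q'.2 this
    have hpw : (PySem.List.enumerate (occIdx t tls 0) 1).Pairwise (fun a b => a.2 ≠ b.2) := by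
      have h1 : (occIdx t tls 0).Pairwise (· ≠ ·) :=
        (occIdx_pairwise t tls 0).imp (fun h => ne_of_lt h)
      rw [← PySem.List.map_snd_enumerate (occIdx t tls 0) 1] at h1
      exact (List.pairwise_map.mp h1)
    apply List.ext_getElem?
    intro j
    by_cases hj : j < groups.length
    · have hjt : j < tls.length := by simpa [htls] using hj
      have hrhs : (mapform groups (P ++ [t]))[j]? = some
          (if titleOf groups[j] ∈ P ++ [t] then renderAt tls ((0 : Int) + j, groups[j])
           else groups[j]) := by
        simp [mapform, PySem.List.getElem?_enumerate, List.getElem?_eq_getElem hj, ← htls]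
      by_cases hpt : titleOf groups[j] = t
      · have htlsj : tls[j] = t := by simp [htls, hpt]
        have hqmem := occIdx_enum_mem t tls 0 1 j hjt htlsj
        rw [scatter_hit v _ _ j _ hpos hpw hqmem (by simp) (by rw [mapform_length]; exact hj)]
        rw [hrhs]
        have hget : PySem.List.pyGetD groups ((0 : Int) + (j : Int)) [] = groups[j] := by
          have : (0 : Int) + (j : Int) = ((j : Nat) : Int) := by omega
          rw [this, PySem.List.pyGetD_natCast]
          exact List.getD_eq_getElem _ _ hj
        have hmem : titleOf groups[j] ∈ P ++ [t] := by simp [hpt]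
        rw [if_pos hmem]
        have hrd : renderAt tls ((0 : Int) + (j : Int), groups[j])
            = setTitle groups[j] (fmtTitle t (((tls.take (j + 1)).count t : Int))) := by
          rw [renderAt, if_pos ⟨by rw [hpt]; exact ht, by rw [hpt]; exact hcnt⟩]
          simp [hpt]
        rw [hrd, hv]
        simp only [hget]
        have htake : (tls.take (j + 1)).count t = (tls.take j).count t + 1 := by
          rw [List.take_add_one]
          simp [List.getElem?_eq_getElem hjt, htlsj]
        have harg : (1 : Int) + ((tls.take j).count t : Int)
            = ((tls.take (j + 1)).count t : Int) := by
          rw [htake]; push_cast; omega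
        rw [harg]
      · have hne : ∀ q' ∈ PySem.List.enumerate (occIdx t tls 0) 1, q'.2 ≠ (j : Int) := by
          intro q' hq' heq
          have hqm : q'.2 ∈ occIdx t tls 0 := by
            obtain ⟨k, hk, rfl⟩ := (PySem.List.mem_enumerate_iff _ _ _).mp hq'
            exact List.getElem_mem hk
          obtain ⟨k, hkl, hik, hkt⟩ := occIdx_mem t tls 0 q'.2 hqm
          have : k = j := by omega
          subst this
          rw [List.getElem?_eq_getElem hkl] at hkt
          have : tls[k] = t := by simpa using hkt
          exact hpt (by simpa [htls] using this)
        rw [scatter_untouched v _ _ j hpos hne, hrhs]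
        have hlhs : (mapform groups P)[j]? = some
            (if titleOf groups[j] ∈ P then renderAt tls ((0 : Int) + j, groups[j])
             else groups[j]) := by
          simp [mapform, PySem.List.getElem?_enumerate, List.getElem?_eq_getElem hj, ← htls]
        rw [hlhs]
        have : (titleOf groups[j] ∈ P ++ [t]) ↔ (titleOf groups[j] ∈ P) := by
          simp [hpt]
        by_cases hp : titleOf groups[j] ∈ P
        · rw [if_pos hp, if_pos (this.mpr hp)]
        · rw [if_neg hp, if_neg (fun h => hp (this.mp h))]
    · have h1 : (mapform groups (P ++ [t])).length ≤ j := by rw [mapform_length]; omega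
      have h2 : ((PySem.List.enumerate (occIdx t tls 0) 1).foldl
          (fun r q => PySem.List.pySetD r q.2 (v q)) (mapform groups P)).length ≤ j := by
        rw [scatter_length, mapform_length]; omega
      rw [List.getElem?_eq_none h1, List.getElem?_eq_none h2]
  · -- a title occurring at most once: no write and no change in the pointwise form
    have hcnt : ¬ tls.count t > 1 := by rw [← occIdx_length t tls 0]; exact hlen
    rw [bScatter, if_neg hlen]
    apply List.map_congr_left
    intro p hp
    by_cases hmem : titleOf p.2 ∈ P
    · rw [if_pos hmem, if_pos (by simp [hmem])]
    · rw [if_neg hmem]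
      by_cases he : titleOf p.2 = t
      · by_cases hm2 : titleOf p.2 ∈ P ++ [t]
        · rw [if_pos hm2, renderAt, if_neg (by rw [he]; exact fun h => hcnt h.2)]
        · rw [if_neg hm2]
      · rw [if_neg (by simp [hmem, he])]

lemma keyfold (groups : List (List (String × String))) (dget : String → List Int)
    (hdget : ∀ t, t ≠ "" → dget t = occIdx t (groups.map titleOf) 0) :
    ∀ (K P : List String), (∀ k ∈ K, k ≠ "") →
      K.foldl (fun r k => bScatter groups r (k, dget k)) (mapform groups P)
        = mapform groups (P ++ K) := by
  intro K
  induction K with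
  | nil => intro P _; simp [mapform]
  | cons k K ih =>
    intro P hK
    have hk : k ≠ "" := hK k List.mem_cons_self
    rw [List.foldl_cons, hdget k hk, scatter_one groups k hk P,
      ih (P ++ [k]) (fun k' h => hK k' (List.mem_cons_of_mem _ h))]
    simp

-- ===== VERDICT (by name: the statement is the Claim_ definition above) =====
theorem disambiguate_duplicate_group_titles_spec : Claim_equal_disambiguate_duplicate_group_titles := by
  intro groups _
  unfold Spec_disambiguate_duplicate_group_titles
  set tls := groups.map titleOf with htls
  -- A's stateful pass produces the pointwise form
  have hA : disambiguate_duplicate_group_titles groups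
      = (PySem.List.enumerate groups 0).map (renderAt tls) := by
    unfold disambiguate_duplicate_group_titles
    have h := a_loop_eq tls
      (PySem.Dict.counter ((groups.filter (fun g => titleOf g ≠ "")).map titleOf))
      (fun t ht => by simpa [← htls] using counter_titles_getD groups t ht)
      groups [] (by simp [htls]) PySem.Dict.empty []
      (by intro t ht _; simp [PySem.Dict.getD_empty])
    simpa using h
  rw [hA]
  -- B's grouped index dict, characterised
  set d : PySem.Dict String (List Int) :=
    (PySem.List.enumerate groups 0).foldl bIndexStep PySem.Dict.empty with hd
  have hdget : ∀ t, t ≠ "" → d.getD t [] = occIdx t tls 0 := by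
    intro t ht
    rw [hd]
    have h := dict_getD_aux t ht groups 0 PySem.Dict.empty
    simpa [PySem.Dict.getD_empty, ← htls] using h
  have hkeys : d.keys = PySem.Set.ofList (tls.filter (fun t => t ≠ "")) := by
    rw [hd, dict_keys_aux groups 0 PySem.Dict.empty]
    rfl
  have hnodup : d.keys.Nodup := by
    rw [hkeys]; exact PySem.Set.nodup_ofList _
  have htruthy : ∀ k ∈ d.keys, k ≠ "" := by
    rw [hkeys]
    intro k hk
    have hm := (PySem.Set.mem_ofList _ _).mp hk
    simpa using List.of_mem_filter hm
  -- B unfolds to a fold of bScatter over the dict's keys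
  have hB : disambiguate_duplicate_group_titles_alt groups
      = d.items.foldl (bScatter groups) groups := rfl
  have hinit : groups = mapform groups [] := by
    simp [mapform]
  have hfold := keyfold groups (fun k => d.getD k []) hdget d.keys [] htruthy
  rw [← hinit] at hfold
  rw [hB, PySem.Dict.items_eq_map_keys d hnodup [], List.foldl_map, hfold]
  -- the keys cover every truthy title, so the processed form is the full pointwise form
  rw [mapform]
  apply List.map_congr_left
  intro p hp
  simp only [List.nil_append, ← htls]
  by_cases hmem : titleOf p.2 ∈ d.keys
  · rw [if_pos hmem]
  · rw [if_neg hmem, renderAt]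
    rw [if_neg ?_]
    intro ⟨ht0, _⟩
    apply hmem
    rw [hkeys]
    apply (PySem.Set.mem_ofList _ _).mpr
    apply List.mem_filter.mpr
    refine ⟨?_, by simpa using ht0⟩
    obtain ⟨k, hk, rfl⟩ := (PySem.List.mem_enumerate_iff _ _ _).mp hp
    rw [htls]
    exact List.mem_map_of_mem (List.getElem_mem hk)
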